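-- pv_equiv track=rewrite | github.com/ambujpawar/advent_of_code_2020 | day_4.py | SeperateIndividualPassport
-- ===== SOURCE A (Python) =====
-- def SeperateIndividualPassport(list_input_string):
--     """
--     Separate input from lists of lists to a list per passport
--     """
--     passports_list = []
--     passport_details = ''
--
--     for input_line in list_input_string:
--         if input_line == '':
--             passports_list.append(passport_details)
--             passport_details = ''
--         else:
--             passport_details = passport_details + input_line + ' '
--
--     return passports_list
-- ===== SOURCE B (Python) =====
-- def SeperateIndividualPassport(list_input_string):
--     """
--     Separate input from lists of lists to a list per passport
--     """
--     groups = []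
--     current = []
--     for line in list_input_string:
--         if line == '':
--             groups.append(current)
--             current = []
--         else:
--             current.append(line)
--     return [''.join(line + ' ' for line in group) for group in groups]
-- ===== Notes on version B (the rewrite author's own statement) =====
-- stated objective: faster
-- what changed: B first groups lines into a list of sublists split at blank lines (dropping the trailing incomplete group, as A does), then maps each group to its passport string with a single join, avoiding A's repeated string concatenation into a running string.
import Mathlib
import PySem

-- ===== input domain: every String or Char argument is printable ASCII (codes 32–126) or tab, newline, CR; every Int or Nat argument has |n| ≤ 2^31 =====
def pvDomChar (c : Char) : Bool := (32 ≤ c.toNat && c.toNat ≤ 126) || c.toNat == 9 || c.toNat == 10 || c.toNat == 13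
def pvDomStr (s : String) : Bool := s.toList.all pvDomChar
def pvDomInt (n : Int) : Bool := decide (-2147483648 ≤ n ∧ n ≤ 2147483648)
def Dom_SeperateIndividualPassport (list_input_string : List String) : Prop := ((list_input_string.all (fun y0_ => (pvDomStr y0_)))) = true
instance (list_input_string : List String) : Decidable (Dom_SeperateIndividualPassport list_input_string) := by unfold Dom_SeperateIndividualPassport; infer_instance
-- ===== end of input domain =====

-- B groups lines into sublists split at blank lines, then maps each group to its
-- joined string; A concatenates into a running string in one pass. Return values equal.

-- ===== PORT A =====
-- A's loop: state (passports_list, passport_details); on '' flush, else append line + ' '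
def pvALoop (lines : List String) (passports_list : List String) (passport_details : String) : List String :=
  match lines with
  | [] => passports_list
  | input_line :: rest =>
    if input_line = "" then pvALoop rest (passports_list ++ [passport_details]) ""
    else pvALoop rest passports_list (passport_details ++ input_line ++ " ")

def SeperateIndividualPassport (list_input_string : List String) : List String :=
  pvALoop list_input_string [] ""

-- ===== PORT B =====
-- B's first pass: build the list of groups (trailing incomplete group dropped)
def pvBGroups (lines : List String) (groups : List (List String)) (current : List String) : List (List String) :=
  match lines with
  | [] => groups
  | line :: rest =>
    if line = "" then pvBGroups rest (groups ++ [current]) []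
    else pvBGroups rest groups (current ++ [line])

-- B's second pass: ''.join(line + ' ' for line in group)
def pvBJoin (group : List String) : String :=
  String.join (group.map (fun line => line ++ " "))

def SeperateIndividualPassport_alt (list_input_string : List String) : List String :=
  (pvBGroups list_input_string [] []).map pvBJoin

-- ===== PRECONDITION & SPEC =====
def Spec_SeperateIndividualPassport (list_input_string : List String) (out : List String) : Prop := out = SeperateIndividualPassport_alt list_input_string
instance (list_input_string : List String) (out : List String) : Decidable (Spec_SeperateIndividualPassport list_input_string out) := by unfold Spec_SeperateIndividualPassport; infer_instance

-- ===== CLAIM (what is proved, stated in full; the proofs are below) =====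
def Claim_equal_SeperateIndividualPassport : Prop := ∀ (list_input_string : List String), Dom_SeperateIndividualPassport list_input_string → Spec_SeperateIndividualPassport list_input_string (SeperateIndividualPassport list_input_string)

-- ===== LEMMAS AND PROOFS =====
theorem pvBJoin_append_one (g : List String) (l : String) :
    pvBJoin (g ++ [l]) = pvBJoin g ++ l ++ " " := by
  simp [pvBJoin, String.join, String.append_assoc]

theorem pvALoop_eq (lines : List String) (gs : List (List String)) (cur : List String) :
    pvALoop lines (gs.map pvBJoin) (pvBJoin cur) = (pvBGroups lines gs cur).map pvBJoin := by
  induction lines generalizing gs cur with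
  | nil => simp [pvALoop, pvBGroups]
  | cons l rest ih =>
    by_cases h : l = ""
    · simpa [pvALoop, pvBGroups, h, pvBJoin] using ih (gs ++ [cur]) []
    · simpa [pvALoop, pvBGroups, h, pvBJoin_append_one] using ih gs (cur ++ [l])

-- ===== VERDICT (by name: the statement is the Claim_ definition above) =====
theorem SeperateIndividualPassport_spec : Claim_equal_SeperateIndividualPassport := by
  intro xs _
  show SeperateIndividualPassport xs = SeperateIndividualPassport_alt xs
  simpa [pvBJoin] using pvALoop_eq xs [] []
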